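-- pv_equiv track=rewrite | github.com/tconsigny/CS124 | Chatbot.py | titles_removed
-- ===== SOURCE A (Python) =====
-- def titles_removed(text):
--   notTitles = []
--
--   split_on_quotes = text.split('"')
--   if len(split_on_quotes) % 2 == 0:
--     split_on_quotes = split_on_quotes[:-1]
--   for i in range((len(split_on_quotes))):
--     if i % 2 == 0:
--       notTitles.append(split_on_quotes[i])
--
--   return ' '.join(notTitles)
-- ===== SOURCE B (Python) =====
-- def titles_removed(text):
--   results = []
--   seg = ''
--   inside = False
--   for ch in text:
--     if ch == '"':
--       if inside:
--         seg = ''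
--         inside = False
--       else:
--         results.append(seg)
--         seg = ''
--         inside = True
--     else:
--       seg += ch
--   if not inside:
--     results.append(seg)
--   return ' '.join(results)
-- ===== Notes on version B (the rewrite author's own statement) =====
-- stated objective: alternative
-- what changed: Replaced split-on-quote + even-index selection over the split list with a single character scan maintaining an inside-quotes flag, a current segment and a result list.
import Mathlib
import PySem

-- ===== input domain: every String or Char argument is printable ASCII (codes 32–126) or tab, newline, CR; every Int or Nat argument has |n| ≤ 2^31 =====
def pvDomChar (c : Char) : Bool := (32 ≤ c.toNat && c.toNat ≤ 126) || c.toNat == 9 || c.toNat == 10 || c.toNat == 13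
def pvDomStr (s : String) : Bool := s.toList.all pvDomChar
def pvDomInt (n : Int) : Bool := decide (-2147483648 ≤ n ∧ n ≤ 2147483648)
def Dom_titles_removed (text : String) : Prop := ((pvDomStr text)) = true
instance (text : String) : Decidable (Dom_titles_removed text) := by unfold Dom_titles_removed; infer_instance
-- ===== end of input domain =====

-- B replaces split-on-'"' + even-index selection by a single character scan with an
-- inside-quotes flag (objective: alternative decomposition, same O(n) cost).

-- ===== PORT A =====
def titles_removed (text : String) : String :=
  let split_on_quotes := PySem.Chars.splitOn text.toList ['"']
  let split_on_quotes :=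
    if split_on_quotes.length % 2 == 0 then
      PySem.List.slice split_on_quotes none (some (-1))
    else split_on_quotes
  let notTitles :=
    (PySem.List.pyRange 0 (split_on_quotes.length : Int)).foldl
      (fun acc i => if i % 2 == 0 then acc ++ [PySem.List.pyGetD split_on_quotes i []] else acc) []
  String.ofList (PySem.Chars.join [' '] notTitles)

-- ===== PORT B =====
-- the character scan of Source B: state = (inside flag, current segment, collected segments)
def trScan : List Char → Bool → List Char → List (List Char) → List (List Char)
  | [], inside, seg, results => if inside then results else results ++ [seg]
  | c :: rest, inside, seg, results =>
    if c == '"' then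
      if inside then trScan rest false [] results
      else trScan rest true [] (results ++ [seg])
    else trScan rest inside (seg ++ [c]) results

def titles_removed_alt (text : String) : String :=
  String.ofList (PySem.Chars.join [' '] (trScan text.toList false [] []))

-- ===== PRECONDITION & SPEC =====
def Spec_titles_removed (text : String) (out : String) : Prop := out = titles_removed_alt text
instance (text : String) (out : String) : Decidable (Spec_titles_removed text out) := by unfold Spec_titles_removed; infer_instance

-- ===== CLAIM (what is proved, stated in full; the proofs are below) =====
def Claim_equal_titles_removed : Prop := ∀ (text : String), Dom_titles_removed text → Spec_titles_removed text (titles_removed text)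

-- ===== LEMMAS AND PROOFS =====

-- simple split-on-'"' with a reversed pending segment (reference shape of Chars.splitOn)
def sp : List Char → List Char → List (List Char)
  | [], cur => [cur.reverse]
  | c :: rest, cur => if c = '"' then cur.reverse :: sp rest [] else sp rest (c :: cur)

-- elements at even / odd indices
def evens : List α → List α
  | [] => []
  | [x] => [x]
  | x :: _ :: t => x :: evens t

def odds : List α → List α
  | [] => []
  | _ :: t => evens t

theorem evens_cons (x : α) (t : List α) : evens (x :: t) = x :: odds t := by
  cases t <;> simp [evens, odds]

theorem go_eq_sp (fuel : Nat) (l cur : List Char) (acc : List (List Char)) (h : l.length ≤ fuel) :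
    PySem.Chars.splitOn.go ['"'] fuel l cur acc = acc.reverse ++ sp l cur := by
  induction fuel generalizing l cur acc with
  | zero =>
    have hl : l = [] := by cases l <;> simp_all
    subst hl
    simp [PySem.Chars.splitOn.go, sp]
  | succ n ih =>
    cases l with
    | nil => simp [PySem.Chars.splitOn.go, sp]
    | cons c rest =>
      by_cases hc : c = '"'
      · subst hc
        rw [show PySem.Chars.splitOn.go ['"'] (n+1) ('"' :: rest) cur acc
              = PySem.Chars.splitOn.go ['"'] n rest [] (cur.reverse :: acc) from by
            simp [PySem.Chars.splitOn.go, List.isPrefixOf]]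
        rw [ih rest [] (cur.reverse :: acc) (by simp at h; omega)]
        simp [sp]
      · rw [show PySem.Chars.splitOn.go ['"'] (n+1) (c :: rest) cur acc
              = PySem.Chars.splitOn.go ['"'] n rest (c :: cur) acc from by
            simp [PySem.Chars.splitOn.go, List.isPrefixOf, Ne.symm hc]]
        rw [ih rest (c :: cur) acc (by simp at h; omega)]
        simp [sp, hc]

theorem splitOn_eq_sp (cs : List Char) : PySem.Chars.splitOn cs ['"'] = sp cs [] := by
  unfold PySem.Chars.splitOn
  rw [go_eq_sp _ _ _ _ (by omega)]
  simp

-- the even-length drop of the last element does not change the even-index selection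
theorem evens_dropLast (xs : List (List Char)) (h : xs.length % 2 = 0) :
    evens xs.dropLast = evens xs := by
  induction xs using evens.induct with
  | case1 => simp
  | case2 x => simp at h
  | case3 x y t ih =>
    cases t with
    | nil => simp [evens]
    | cons z t' =>
      rw [show (x :: y :: z :: t').dropLast = x :: y :: (z :: t').dropLast from by simp]
      simp only [evens]
      rw [ih (by simp at h ⊢; omega)]

-- A's index loop over pyRange selects the even-index elements
theorem fold_evens (full : List (List Char)) (k : Nat) (res : List (List Char)) :
    (PySem.List.pyRange (k : Int) (full.length : Int)).foldl
      (fun acc i => if i % 2 == 0 then acc ++ [PySem.List.pyGetD full i []] else acc) res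
    = res ++ (if k % 2 = 0 then evens (full.drop k) else odds (full.drop k)) := by
  by_cases hk : k < full.length
  · rw [PySem.List.pyRange_one_cons (by exact_mod_cast hk)]
    simp only [List.foldl_cons]
    have hget : PySem.List.pyGetD full (k : Int) [] = full[k] := by
      rw [PySem.List.pyGetD_natCast]; simp [List.getD, hk]
    have hdrop : full.drop k = full[k] :: full.drop (k + 1) :=
      (List.getElem_cons_drop hk).symm
    have hcast : ((k : Int) + 1) = ((k + 1 : Nat) : Int) := by push_cast; ring
    have hrec := fold_evens full (k + 1)
    by_cases hp : k % 2 = 0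
    · have : ((k : Int) % 2 == 0) = true := by
        simp; omega
      rw [this, if_pos rfl, hget, hcast, hrec]
      have hp1 : ¬ (k + 1) % 2 = 0 := by omega
      rw [if_neg hp1, if_pos hp, hdrop, evens_cons]
      simp [odds]
    · have : ((k : Int) % 2 == 0) = false := by
        simp; omega
      rw [this, if_neg (by simp), hcast, hrec]
      have hp1 : (k + 1) % 2 = 0 := by omega
      rw [if_pos hp1, if_neg hp, hdrop]
      simp [odds]
  · have h1 : PySem.List.pyRange (k : Int) (full.length : Int) = [] := by
      simp [PySem.List.pyRange]; omega
    have h2 : full.drop k = [] := by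
      rw [List.drop_eq_nil_iff]; omega
    rw [h1, h2]
    simp [evens, odds]
termination_by full.length - k

-- the scan invariant: outside a quote it produces the even-index segments,
-- inside a quote the odd-index ones
theorem trScan_eq (cs : List Char) (inside : Bool) (seg : List Char) (res : List (List Char)) :
    trScan cs inside seg res
      = res ++ (if inside then odds (sp cs seg.reverse) else evens (sp cs seg.reverse)) := by
  induction cs generalizing inside seg res with
  | nil =>
    cases inside <;> simp [trScan, sp, odds, evens]
  | cons c rest ih =>
    by_cases hc : c = '"'
    · subst hc
      cases inside with
      | false =>
        rw [show trScan ('"' :: rest) false seg res = trScan rest true [] (res ++ [seg]) from by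
          simp [trScan]]
        rw [ih]
        simp [sp, evens_cons]
      | true =>
        rw [show trScan ('"' :: rest) true seg res = trScan rest false [] res from by
          simp [trScan]]
        rw [ih]
        simp [sp, odds]
    · rw [show trScan (c :: rest) inside seg res = trScan rest inside (seg ++ [c]) res from by
        simp [trScan, hc]]
      rw [ih]
      simp [sp, hc]

-- A's segment computation, written as a standalone term (definitionally the body of port A)
def segA (cs : List Char) : List (List Char) :=
  let split_on_quotes := PySem.Chars.splitOn cs ['"']
  let split_on_quotes :=
    if split_on_quotes.length % 2 == 0 then
      PySem.List.slice split_on_quotes none (some (-1))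
    else split_on_quotes
  (PySem.List.pyRange 0 (split_on_quotes.length : Int)).foldl
    (fun acc i => if i % 2 == 0 then acc ++ [PySem.List.pyGetD split_on_quotes i []] else acc) []

theorem segA_eq_trScan (cs : List Char) : segA cs = trScan cs false [] [] := by
  rw [trScan_eq]
  simp only [List.reverse_nil, Bool.false_eq_true, if_false, List.nil_append]
  unfold segA
  rw [splitOn_eq_sp]
  by_cases hlen : (sp cs []).length % 2 = 0
  · have hslice : PySem.List.slice (sp cs []) none (some (-1)) = (sp cs []).dropLast := by
      have := PySem.List.slice_to_neg_natCast (sp cs []) 1 (by omega)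
      simpa [List.dropLast_eq_take] using this
    simp only [hlen, beq_self_eq_true, if_true, hslice]
    have := fold_evens (sp cs []).dropLast 0 []
    simp only [Nat.cast_zero, Nat.zero_mod, if_true, List.drop_zero, List.nil_append] at this
    rw [← evens_dropLast _ hlen]
    exact this
  · have hb : ((sp cs []).length % 2 == 0) = false := by simp [hlen]
    simp only [hb, Bool.false_eq_true, if_false]
    have := fold_evens (sp cs []) 0 []
    simp only [Nat.cast_zero, Nat.zero_mod, if_true, List.drop_zero, List.nil_append] at this
    exact this

-- ===== VERDICT (by name: the statement is the Claim_ definition above) =====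
theorem titles_removed_spec : Claim_equal_titles_removed := by
  intro text _
  show String.ofList (PySem.Chars.join [' '] (segA text.toList)) = _
  rw [segA_eq_trScan]
  rfl
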